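-- pv_equiv track=rewrite | github.com/nair0lf32/zer0ne-blog | static/hackerlab2022/main.py | bang
-- ===== SOURCE A (Python) =====
-- import string
--
-- def bang(data,shift):
--     enc = ''
--     for c in data:
--         if c not in string.ascii_letters:
--             enc += c
--         else:
--             if c in string.ascii_lowercase:
--                 start = ord('a')
--             else:
--                 start = ord('A')
--             enc += chr(((ord(c) - start + shift) % 26) + start)
--
--     return enc[-1] + enc[:-1].swapcase()
-- ===== SOURCE B (Python) =====
-- import string
--
-- def bang(data, shift):
--     s = shift % 26
--     lo, up = string.ascii_lowercase, string.ascii_uppercase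
--     table = str.maketrans(lo + up, lo[s:] + lo[:s] + up[s:] + up[:s])
--     enc = data.translate(table)
--     return enc[-1] + enc[:-1].swapcase()
-- ===== Notes on version B (the rewrite author's own statement) =====
-- stated objective: faster
-- what changed: Replaces the per-character branch-and-modulo loop by one rotation computed up front (shift % 26) turned into a str.maketrans translation table, so the ciphertext is produced by a single C-level data.translate(table) call; the final rotate-and-swapcase step is unchanged.
import Mathlib
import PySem

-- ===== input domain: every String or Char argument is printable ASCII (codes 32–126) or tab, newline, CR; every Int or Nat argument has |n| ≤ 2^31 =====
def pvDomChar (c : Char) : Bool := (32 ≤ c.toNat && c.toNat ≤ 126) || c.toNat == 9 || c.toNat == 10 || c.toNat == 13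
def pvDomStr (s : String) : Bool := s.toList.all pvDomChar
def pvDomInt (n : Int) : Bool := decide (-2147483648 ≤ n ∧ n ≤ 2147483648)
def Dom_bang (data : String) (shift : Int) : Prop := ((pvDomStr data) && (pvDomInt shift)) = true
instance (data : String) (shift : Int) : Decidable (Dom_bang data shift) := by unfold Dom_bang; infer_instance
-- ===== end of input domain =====

-- B replaces A's per-character branch-and-modulo loop by one precomputed rotation table
-- (str.maketrans) applied with a single translate call; same final rotate-and-swapcase step.

-- ===== PORT A =====
-- c.swapcase() per character; exact on the ASCII domain (PySem.Chars.islower/isupper/upperChar/lowerChar are Python-exact there)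
def pySwapChar (c : Char) : Char :=
  if PySem.Chars.islower c then PySem.Chars.upperChar c
  else if PySem.Chars.isupper c then PySem.Chars.lowerChar c
  else c

-- s.swapcase() on the char list
def pySwapcase (cs : List Char) : List Char := cs.map pySwapChar

-- body of A's for-loop; 'c in string.ascii_lowercase' / 'c in string.ascii_letters' are the
-- islower/isupper range tests (exact: a single ASCII char is in those constants iff in range)
def bangStep (shift : Int) (enc : List Char) (c : Char) : List Char :=
  if !(PySem.Chars.islower c || PySem.Chars.isupper c) then enc ++ [c]
  else
    let start : Int := if PySem.Chars.islower c then 97 else 65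
    enc ++ [Char.ofNat (PySem.Int.mod ((c.toNat : Int) - start + shift) 26 + start).toNat]

def bang (data : String) (shift : Int) : String :=
  let enc := data.toList.foldl (bangStep shift) []
  -- enc[-1] raises IndexError on empty data: excluded by Pre_bang
  match PySem.List.pyGet? enc (-1) with
  | none => ""
  | some last => String.ofList (last :: pySwapcase (PySem.List.slice enc none (some (-1))))

-- ===== PORT B =====
def loAlpha : List Char := "abcdefghijklmnopqrstuvwxyz".toList
def upAlpha : List Char := "ABCDEFGHIJKLMNOPQRSTUVWXYZ".toList

-- str.maketrans(lo+up, lo[s:]+lo[:s]+up[s:]+up[:s]); s = shift % 26 is in [0,26), so the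
-- Python slices lo[s:]/lo[:s] are exactly drop/take at s
def rotTable (s : Nat) : PySem.Dict Char Char :=
  PySem.Dict.ofList ((loAlpha ++ upAlpha).zip
    (loAlpha.drop s ++ loAlpha.take s ++ upAlpha.drop s ++ upAlpha.take s))

def bang_alt (data : String) (shift : Int) : String :=
  let table := rotTable (PySem.Int.mod shift 26).toNat
  -- data.translate(table): unmapped characters pass through unchanged
  let enc := data.toList.map (fun c => table.getD c c)
  -- enc[-1] raises IndexError on empty data: excluded by Pre_bang
  match PySem.List.pyGet? enc (-1) with
  | none => ""
  | some last => String.ofList (last :: pySwapcase (PySem.List.slice enc none (some (-1))))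

-- ===== PRECONDITION & SPEC =====
-- Pre_ excludes only the empty string, on which both Pythons raise IndexError at enc[-1]
def Pre_bang (data : String) (shift : Int) : Prop := data ≠ ""
instance (data : String) (shift : Int) : Decidable (Pre_bang data shift) := by unfold Pre_bang; infer_instance
def pvWitness_bang : String × Int := ("aZ!", 3)

def Spec_bang (data : String) (shift : Int) (out : String) : Prop := out = bang_alt data shift
instance (data : String) (shift : Int) (out : String) : Decidable (Spec_bang data shift out) := by unfold Spec_bang; infer_instance

-- ===== CLAIM (what is proved, stated in full; the proofs are below) =====
def Claim_equal_bang : Prop := ∀ (data : String) (shift : Int), Dom_bang data shift → Pre_bang data shift → Spec_bang data shift (bang data shift)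

-- ===== LEMMAS AND PROOFS =====

-- what A's loop body appends for one character
def encChar (shift : Int) (c : Char) : Char :=
  if !(PySem.Chars.islower c || PySem.Chars.isupper c) then c
  else
    let start : Int := if PySem.Chars.islower c then 97 else 65
    Char.ofNat (PySem.Int.mod ((c.toNat : Int) - start + shift) 26 + start).toNat

theorem bangStep_eq (shift : Int) (enc : List Char) (c : Char) :
    bangStep shift enc c = enc ++ [encChar shift c] := by
  unfold bangStep encChar; split_ifs <;> rfl

theorem encChar_mod (shift : Int) (c : Char) :
    encChar shift c = encChar (PySem.Int.mod shift 26) c := by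
  have key : ∀ x : Int, PySem.Int.mod (x + shift) 26 = PySem.Int.mod (x + PySem.Int.mod shift 26) 26 := by
    intro x
    simp only [PySem.Int.mod_eq_emod_of_pos (show (0:Int) < 26 by norm_num)]
    omega
  unfold encChar
  split_ifs
  · rfl
  · simp [key]
  · simp [key]

set_option maxHeartbeats 4000000 in
set_option maxRecDepth 100000 in
theorem mainCheck : ((List.range 26).all fun s => (List.range 128).all fun k =>
    encChar (s : Int) (Char.ofNat k) == (rotTable s).getD (Char.ofNat k) (Char.ofNat k)) = true := by
  decide

theorem encChar_eq_table (shift : Int) (c : Char) (hc : c.toNat < 128) :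
    encChar shift c = (rotTable (PySem.Int.mod shift 26).toNat).getD c c := by
  have h0 : (0 : Int) ≤ PySem.Int.mod shift 26 := PySem.Int.mod_nonneg shift (by norm_num)
  have h26 : PySem.Int.mod shift 26 < 26 := PySem.Int.mod_lt shift (by norm_num)
  have hm := mainCheck
  simp only [List.all_eq_true, List.mem_range, beq_iff_eq] at hm
  have := hm (PySem.Int.mod shift 26).toNat (by omega) c.toNat hc
  rw [Char.ofNat_toNat] at this
  rw [encChar_mod]
  have hcast : ((PySem.Int.mod shift 26).toNat : Int) = PySem.Int.mod shift 26 := by omega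
  rw [← hcast]
  exact this

theorem bang_spec : Claim_equal_bang := by
  intro data shift hdom _hpre
  unfold Spec_bang bang bang_alt
  have henc : data.toList.foldl (bangStep shift) [] =
      data.toList.map (fun c => (rotTable (PySem.Int.mod shift 26).toNat).getD c c) := by
    rw [PySem.List.foldl_congr_mem data.toList (bangStep shift)
          (fun acc c => acc ++ [encChar shift c]) []
          (fun acc c _ => bangStep_eq shift acc c)]
    rw [PySem.List.foldl_append_singleton_eq_map]
    rw [List.nil_append]
    apply List.map_congr_left
    intro c hc
    apply encChar_eq_table
    have hd : pvDomChar c = true := by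
      have : pvDomStr data = true := by
        unfold Dom_bang at hdom; simp only [Bool.and_eq_true] at hdom; exact hdom.1
      unfold pvDomStr at this
      exact List.all_eq_true.mp this c hc
    unfold pvDomChar at hd
    simp only [Bool.or_eq_true, Bool.and_eq_true, decide_eq_true_eq, beq_iff_eq] at hd
    omega
  rw [henc]
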